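-- pv_equiv track=rewrite | github.com/sneakinhysteria/EarFix | scripts/convert_autoeq.py | select_best_source
-- ===== SOURCE A (Python) =====
-- PREFERRED_SOURCES = [
--     "oratory1990",
--     "crinacle/GRAS 43AG-7",
--     "crinacle/711 in-ear",
--     "Rtings",
--     "Innerfidelity",
-- ]
--
-- def select_best_source(headphones_by_name):
--     """Select the best measurement source for each headphone."""
--     selected = {}
--
--     for name, variants in headphones_by_name.items():
--         best = None
--         best_priority = len(PREFERRED_SOURCES) + 1
--
--         for hp in variants:
--             for i, pref_source in enumerate(PREFERRED_SOURCES):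
--                 if pref_source in hp["source"]:
--                     if i < best_priority:
--                         best = hp
--                         best_priority = i
--                     break
--             else:
--                 if best is None:
--                     best = hp
--
--         if best:
--             selected[name] = best
--
--     return selected
-- ===== SOURCE B (Python) =====
-- PREFERRED_SOURCES = [
--     "oratory1990",
--     "crinacle/GRAS 43AG-7",
--     "crinacle/711 in-ear",
--     "Rtings",
--     "Innerfidelity",
-- ]
--
--
-- def select_best_source(headphones_by_name):
--     """Select the best measurement source for each headphone."""
--     selected = {}
--     for name, variants in headphones_by_name.items():
--         best = next(
--             (hp for pref in PREFERRED_SOURCES for hp in variants if pref in hp["source"]),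
--             variants[0] if variants else None,
--         )
--         if best:
--             selected[name] = best
--     return selected
-- ===== Notes on version B (the rewrite author's own statement) =====
-- stated objective: alternative
-- what changed: A scans variant-by-variant keeping a best/best_priority accumulator with a for/else fallback; B inverts the traversal: it scans PREFERRED_SOURCES in priority order and takes the first variant matching the current source (falling back to the first variant), so no priority score or accumulator is ever maintained.
import Mathlib
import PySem

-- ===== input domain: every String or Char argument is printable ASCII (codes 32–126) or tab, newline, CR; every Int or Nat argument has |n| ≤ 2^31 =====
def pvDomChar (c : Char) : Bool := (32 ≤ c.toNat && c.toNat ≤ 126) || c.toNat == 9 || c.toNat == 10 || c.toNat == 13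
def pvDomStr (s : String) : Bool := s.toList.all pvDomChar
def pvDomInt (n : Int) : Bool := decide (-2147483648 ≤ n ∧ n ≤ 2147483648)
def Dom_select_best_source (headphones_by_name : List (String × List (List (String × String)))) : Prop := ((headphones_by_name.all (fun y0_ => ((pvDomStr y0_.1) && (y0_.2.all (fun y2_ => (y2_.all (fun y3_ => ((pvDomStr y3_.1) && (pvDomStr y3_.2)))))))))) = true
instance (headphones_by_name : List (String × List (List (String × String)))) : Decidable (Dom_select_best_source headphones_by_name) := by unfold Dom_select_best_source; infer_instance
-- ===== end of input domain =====

-- B inverts the traversal: instead of A's per-variant best/best_priority accumulator with a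
-- for/else fallback, it scans the preferred sources in priority order and takes the first
-- variant matching the current source (alternative decomposition; same cost).

-- ===== PORT A =====
def PREFERRED_SOURCES : List String :=
  ["oratory1990", "crinacle/GRAS 43AG-7", "crinacle/711 in-ear", "Rtings", "Innerfidelity"]

-- hp["source"]; total via getD — Pre_ excludes the inputs where Python raises KeyError
def srcOf (hp : List (String × String)) : String := (PySem.Dict.mk hp).getD "source" ""

-- A's inner `for i, pref_source in enumerate(PREFERRED_SOURCES): … break / else: …`
def aPrefLoop (hp : List (String × String)) (src : String) :
    List (Int × String) → Option (List (String × String)) × Int →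
    Option (List (String × String)) × Int
  | [], st => (if st.1.isNone then some hp else st.1, st.2)   -- the for/else fallback
  | (i, pref) :: rest, st =>
      if PySem.Str.isIn pref src then
        (if i < st.2 then (some hp, i) else st)               -- break after the update
      else aPrefLoop hp src rest st

-- body of A's `for hp in variants` loop
def aStep (st : Option (List (String × String)) × Int) (hp : List (String × String)) :
    Option (List (String × String)) × Int :=
  aPrefLoop hp (srcOf hp) (PySem.List.enumerate PREFERRED_SOURCES) st

def select_best_source (headphones_by_name : List (String × List (List (String × String)))) :
    List (String × List (String × String)) :=
  (headphones_by_name.foldl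
    (fun selected nv =>
      let st := nv.2.foldl aStep (none, (PREFERRED_SOURCES.length : Int) + 1)
      match st.1 with
      | some best => if best ≠ [] then selected.insert nv.1 best else selected  -- `if best:`
      | none => selected)
    (PySem.Dict.empty : PySem.Dict String (List (String × String)))).items

-- ===== PORT B =====
-- inner generator pass for one preferred source: first variant whose source contains it
def bFind (pref : String) : List (List (String × String)) → Option (List (String × String))
  | [] => none
  | hp :: rest => if PySem.Str.isIn pref (srcOf hp) then some hp else bFind pref rest

-- `next((hp for pref in PREFERRED_SOURCES for hp in variants if pref in hp["source"]), …)`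
def bScan (vs : List (List (String × String))) : List String → Option (List (String × String))
  | [] => none
  | pref :: rest =>
      match bFind pref vs with
      | some hp => some hp
      | none => bScan vs rest

def select_best_source_alt (headphones_by_name : List (String × List (List (String × String)))) :
    List (String × List (String × String)) :=
  (headphones_by_name.foldl
    (fun selected nv =>
      let best : Option (List (String × String)) :=
        match bScan nv.2 PREFERRED_SOURCES with
        | some hp => some hp
        | none => nv.2.head?                     -- `variants[0] if variants else None`
      match best with
      | some b => if b ≠ [] then selected.insert nv.1 b else selected  -- `if best:`
      | none => selected)
    (PySem.Dict.empty : PySem.Dict String (List (String × String)))).items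

-- ===== PRECONDITION & SPEC =====
-- Pre_ excludes exactly the inputs where Python A raises KeyError: a variant dict without "source".
def Pre_select_best_source (headphones_by_name : List (String × List (List (String × String)))) : Prop :=
  ∀ nv ∈ headphones_by_name, ∀ hp ∈ nv.2, (PySem.Dict.mk hp).contains "source" = true

instance (headphones_by_name : List (String × List (List (String × String)))) :
    Decidable (Pre_select_best_source headphones_by_name) := by
  unfold Pre_select_best_source; infer_instance

def pvWitness_select_best_source : (List (String × List (List (String × String)))) :=
  [("HD 600", [[("source", "Rtings test")], [("source", "oratory1990")]]),
   ("K371", [[("source", "somewhere else")]])]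

def Spec_select_best_source (headphones_by_name : List (String × List (List (String × String)))) (out : List (String × List (String × String))) : Prop := out = select_best_source_alt headphones_by_name
instance (headphones_by_name : List (String × List (List (String × String)))) (out : List (String × List (String × String))) : Decidable (Spec_select_best_source headphones_by_name out) := by unfold Spec_select_best_source; infer_instance

-- ===== CLAIM (what is proved, stated in full; the proofs are below) =====
def Claim_equal_select_best_source : Prop := ∀ (headphones_by_name : List (String × List (List (String × String)))), Dom_select_best_source headphones_by_name → Pre_select_best_source headphones_by_name → Spec_select_best_source headphones_by_name (select_best_source headphones_by_name)

-- ===== LEMMAS AND PROOFS =====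

-- proof-side rank of a variant: index of first matching preferred source, sentinel = length
def bPrioLoop (src : String) : List (Int × String) → Option Int
  | [] => none
  | (i, pref) :: rest => if PySem.Str.isIn pref src then some i else bPrioLoop src rest

def bPriority (hp : List (String × String)) : Int :=
  (bPrioLoop (srcOf hp) (PySem.List.enumerate PREFERRED_SOURCES)).getD
    (PREFERRED_SOURCES.length : Int)

-- the same rank as a structural recursion over the source list
def prioL (src : String) : List String → Int
  | [] => 0
  | p :: L => if PySem.Str.isIn p src then 0 else 1 + prioL src L

def keyL (L : List String) (hp : List (String × String)) : Int := prioL (srcOf hp) L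

-- generic first-min fold (the shape A's variant loop reduces to)
def fm (f : List (String × String) → Int) (vs : List (List (String × String)))
    (acc : Option (List (String × String))) : Option (List (String × String)) :=
  vs.foldl (fun acc x =>
    match acc with
    | none => some x
    | some m => if f x < f m then some x else some m) acc

-- A's inner for/else loop, characterised by the first-match scan of the same pairs
theorem aPrefLoop_eq (hp : List (String × String)) (src : String)
    (l : List (Int × String)) (st : Option (List (String × String)) × Int) :
    aPrefLoop hp src l st =
      match bPrioLoop src l with
      | some i => if i < st.2 then (some hp, i) else st
      | none => (if st.1.isNone then some hp else st.1, st.2) := by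
  induction l with
  | nil => simp [aPrefLoop, bPrioLoop]
  | cons p rest ih =>
      obtain ⟨i, pref⟩ := p
      by_cases h : PySem.Chars.isIn pref.toList src.toList = true
      · simp [aPrefLoop, bPrioLoop, h]
      · simp [aPrefLoop, bPrioLoop, h, ih]

theorem bPrioLoop_bounds (src : String) (l : List String) :
    ∀ (s i : Int), bPrioLoop src (PySem.List.enumerate l s) = some i →
      s ≤ i ∧ i < s + l.length := by
  induction l with
  | nil => intro s i h; simp [PySem.List.enumerate_nil, bPrioLoop] at h
  | cons x rest ih =>
      intro s i h
      rw [PySem.List.enumerate_cons] at h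
      by_cases hx : PySem.Str.isIn x src
      · rw [bPrioLoop, if_pos hx] at h
        injection h with h
        subst h
        refine ⟨le_refl _, ?_⟩
        simp only [List.length_cons]
        push_cast
        omega
      · rw [bPrioLoop, if_neg hx] at h
        have := ih (s + 1) i h
        simp only [List.length_cons]
        push_cast at this ⊢
        omega

-- the state A's variant loop maintains, as a function of the running first-min
def repSt (o : Option (List (String × String))) : Option (List (String × String)) × Int :=
  match o with
  | none => (none, (PREFERRED_SOURCES.length : Int) + 1)
  | some b => (some b, if bPriority b < (PREFERRED_SOURCES.length : Int)
                       then bPriority b else (PREFERRED_SOURCES.length : Int) + 1)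

theorem aStep_eq (o : Option (List (String × String))) (hp : List (String × String)) :
    aStep (repSt o) hp =
      repSt (match o with
             | none => some hp
             | some m => if bPriority hp < bPriority m then some hp else some m) := by
  have hlen : (PREFERRED_SOURCES : List String).length = 5 := rfl
  unfold aStep
  rw [aPrefLoop_eq]
  cases hq : bPrioLoop (srcOf hp) (PySem.List.enumerate PREFERRED_SOURCES) with
  | none =>
      have hP : bPriority hp = 5 := by
        unfold bPriority; rw [hq]; simp [hlen]
      cases o with
      | none => simp [repSt, hP, hlen]
      | some m =>
          cases hqm : bPrioLoop (srcOf m) (PySem.List.enumerate PREFERRED_SOURCES) with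
          | none =>
              have hPm : bPriority m = 5 := by unfold bPriority; rw [hqm]; simp [hlen]
              simp [repSt, hP, hPm, hlen]
          | some j =>
              have hb := bPrioLoop_bounds _ PREFERRED_SOURCES 0 j hqm
              have hPm : bPriority m = j := by unfold bPriority; rw [hqm]; simp
              rw [hlen] at hb
              simp only [repSt, hP, hPm, hlen]
              split_ifs <;> simp_all <;> omega
  | some i =>
      have hb := bPrioLoop_bounds _ PREFERRED_SOURCES 0 i hq
      have hP : bPriority hp = i := by unfold bPriority; rw [hq]; simp
      rw [hlen] at hb
      cases o with
      | none =>
          simp only [repSt, hP, hlen]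
          split_ifs <;> first | rfl | omega
      | some m =>
          cases hqm : bPrioLoop (srcOf m) (PySem.List.enumerate PREFERRED_SOURCES) with
          | none =>
              have hPm : bPriority m = 5 := by unfold bPriority; rw [hqm]; simp [hlen]
              simp only [repSt, hP, hPm, hlen]
              split_ifs <;> simp_all <;> omega
          | some j =>
              have hbm := bPrioLoop_bounds _ PREFERRED_SOURCES 0 j hqm
              have hPm : bPriority m = j := by unfold bPriority; rw [hqm]; simp
              rw [hlen] at hbm
              simp only [repSt, hP, hPm, hlen]
              split_ifs <;> simp_all <;> omega

theorem foldl_aStep_eq (vs : List (List (String × String))) :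
    ∀ o, vs.foldl aStep (repSt o) = repSt (fm bPriority vs o) := by
  induction vs with
  | nil => intro o; rfl
  | cons v rest ih =>
      intro o
      simp only [List.foldl_cons, fm] at *
      rw [aStep_eq o v, ih]

-- bPrioLoop over enumerate, re-expressed as the structural rank prioL
theorem bPrioLoop_prioL (src : String) (l : List String) :
    ∀ s : Int,
      (match bPrioLoop src (PySem.List.enumerate l s) with
       | some i => i - s
       | none => (l.length : Int)) = prioL src l := by
  induction l with
  | nil => intro s; simp [PySem.List.enumerate_nil, bPrioLoop, prioL]
  | cons p rest ih =>
      intro s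
      rw [PySem.List.enumerate_cons]
      by_cases hx : PySem.Str.isIn p src
      · rw [bPrioLoop, if_pos hx, prioL, if_pos hx]
        simp
      · rw [bPrioLoop, if_neg hx, prioL, if_neg hx, ← ih (s + 1)]
        cases h : bPrioLoop src (PySem.List.enumerate rest (s + 1)) with
        | none => simp [List.length_cons]; push_cast; ring
        | some i =>
            show i - s = 1 + (i - (s + 1))
            omega

theorem bPriority_eq (hp : List (String × String)) :
    bPriority hp = keyL PREFERRED_SOURCES hp := by
  have h := bPrioLoop_prioL (srcOf hp) PREFERRED_SOURCES 0
  unfold bPriority keyL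
  cases hq : bPrioLoop (srcOf hp) (PySem.List.enumerate PREFERRED_SOURCES) with
  | none => rw [hq] at h; simpa using h
  | some i => rw [hq] at h; simp at h ⊢; omega

theorem prioL_nonneg (src : String) (L : List String) : 0 ≤ prioL src L := by
  induction L with
  | nil => simp [prioL]
  | cons p rest ih => by_cases h : PySem.Str.isIn p src <;> simp [prioL, h] <;> omega

-- once the accumulator attains a minimum, the fold keeps it
theorem fm_fix (f : List (String × String) → Int) (m : List (String × String)) :
    ∀ vs, (∀ x ∈ vs, ¬ f x < f m) → fm f vs (some m) = some m := by
  intro vs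
  induction vs with
  | nil => intro _; rfl
  | cons x rest ih =>
      intro h
      simp only [fm, List.foldl_cons]
      rw [if_neg (h x (by simp))]
      exact ih (fun y hy => h y (by simp [hy]))

-- the first zero-rank element wins the first-min fold
theorem fm_first_zero (p : String) (L : List String) (hp : List (String × String)) :
    ∀ vs acc, bFind p vs = some hp →
      (∀ m, acc = some m → 0 < keyL (p :: L) m) →
      fm (keyL (p :: L)) vs acc = some hp := by
  intro vs
  induction vs generalizing hp with
  | nil => intro acc h; simp [bFind] at h
  | cons x rest ih =>
      intro acc h hacc
      rw [bFind] at h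
      by_cases hx : PySem.Str.isIn p (srcOf x)
      · rw [if_pos hx] at h
        have hk : keyL (p :: L) x = 0 := by unfold keyL; rw [prioL, if_pos hx]
        injection h with h
        subst h
        have hstep : fm (keyL (p :: L)) (x :: rest) acc = fm (keyL (p :: L)) rest (some x) := by
          cases acc with
          | none => rfl
          | some m =>
              simp only [fm, List.foldl_cons]
              rw [if_pos (by rw [hk]; exact hacc m rfl)]
        rw [hstep]
        refine fm_fix _ x rest (fun y _ => ?_)
        rw [hk]
        have := prioL_nonneg (srcOf y) (p :: L)
        unfold keyL
        omega
      · rw [if_neg hx] at h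
        have hkx : 0 < keyL (p :: L) x := by
          unfold keyL
          rw [prioL, if_neg hx]
          have := prioL_nonneg (srcOf x) L
          omega
        cases acc with
        | none =>
            show fm (keyL (p :: L)) rest (some x) = some hp
            exact ih hp (some x) h (fun m hm => by injection hm with hm; subst hm; exact hkx)
        | some m =>
            simp only [fm, List.foldl_cons]
            by_cases hc : keyL (p :: L) x < keyL (p :: L) m
            · rw [if_pos hc]
              exact ih hp (some x) h (fun m' hm => by injection hm with hm; subst hm; exact hkx)
            · rw [if_neg hc]
              exact ih hp (some m) h (fun m' hm => by injection hm with hm; subst hm; exact hacc m rfl)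

-- shifting every rank by one does not change the first-min fold
theorem fm_congr_succ (f g : List (String × String) → Int) :
    ∀ vs acc, (∀ x ∈ vs, f x = 1 + g x) → (∀ m, acc = some m → f m = 1 + g m) →
      fm f vs acc = fm g vs acc := by
  intro vs
  induction vs with
  | nil => intro acc _ _; rfl
  | cons x rest ih =>
      intro acc h hacc
      have hx : f x = 1 + g x := h x (by simp)
      have hrest : ∀ y ∈ rest, f y = 1 + g y := fun y hy => h y (by simp [hy])
      cases acc with
      | none =>
          show fm f rest (some x) = fm g rest (some x)
          exact ih (some x) hrest (fun m hm => by injection hm with hm; subst hm; exact hx)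
      | some m =>
          have hm : f m = 1 + g m := hacc m rfl
          have hiff : f x < f m ↔ g x < g m := by omega
          simp only [fm, List.foldl_cons]
          by_cases hc : g x < g m
          · rw [if_pos (hiff.mpr hc), if_pos hc]
            exact ih (some x) hrest (fun m' hm' => by injection hm' with hm'; subst hm'; exact hx)
          · rw [if_neg (fun hcc => hc (hiff.mp hcc)), if_neg hc]
            exact ih (some m) hrest (fun m' hm' => by injection hm' with hm'; subst hm'; exact hm)

theorem bFind_none (p : String) :
    ∀ vs, bFind p vs = none → ∀ x ∈ vs, PySem.Str.isIn p (srcOf x) = false := by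
  intro vs
  induction vs with
  | nil => intro _ x hx; simp at hx
  | cons y rest ih =>
      intro h x hx
      rw [bFind] at h
      by_cases hy : PySem.Str.isIn p (srcOf y)
      · rw [if_pos hy] at h; exact absurd h (by simp)
      · rw [if_neg hy] at h
        rcases List.mem_cons.mp hx with rfl | hx'
        · simpa using hy
        · exact ih h x hx'

-- the first-min fold over prioL-ranks IS B's source-first scan (with first-variant fallback)
theorem fm_bScan : ∀ (L : List String) (vs : List (List (String × String))),
    fm (keyL L) vs none =
      (match bScan vs L with
       | some hp => some hp
       | none => vs.head?) := by
  intro L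
  induction L with
  | nil =>
      intro vs
      cases vs with
      | nil => rfl
      | cons x rest =>
          show fm (keyL []) rest (some x) = some x
          exact fm_fix _ x rest (fun y _ => by simp [keyL, prioL])
  | cons p L ih =>
      intro vs
      cases h : bFind p vs with
      | some hp =>
          rw [show bScan vs (p :: L) = some hp by rw [bScan, h]]
          exact fm_first_zero p L hp vs none h (fun m hm => by cases hm)
      | none =>
          have hall := bFind_none p vs h
          rw [show bScan vs (p :: L) = bScan vs L by rw [bScan, h]]
          rw [← ih vs]
          exact fm_congr_succ (keyL (p :: L)) (keyL L) vs none
            (fun x hx => by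
              unfold keyL
              rw [prioL, if_neg (fun hc => by rw [hall x hx] at hc; exact absurd hc Bool.false_ne_true)])
            (fun m hm => by cases hm)

-- ===== VERDICT (by name: the statement is the Claim_ definition above) =====
theorem select_best_source_spec : Claim_equal_select_best_source := by
  intro xs _ _
  unfold Spec_select_best_source select_best_source select_best_source_alt
  congr 2
  funext selected nv
  have h1 : nv.2.foldl aStep (none, (PREFERRED_SOURCES.length : Int) + 1) =
      repSt (fm bPriority nv.2 none) := foldl_aStep_eq nv.2 none
  have hf : bPriority = keyL PREFERRED_SOURCES := funext bPriority_eq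
  rw [h1, hf, fm_bScan]
  cases hs : bScan nv.2 PREFERRED_SOURCES with
  | some hp => simp [repSt]
  | none => cases nv.2 <;> simp [repSt]
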